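-- pv_equiv track=rewrite | github.com/Mayonnaise-Slap/MegaSchoolAI | utils/data_retrival_util.py | extract_surrounding
-- ===== SOURCE A (Python) =====
-- def extract_surrounding(source, indexes, bound=100):
--     result = []
--     while indexes:
--         center = indexes.pop(0)
--         start, end = max(0, center - bound), min(len(source), center + bound)
--         while indexes and indexes[0] - (2 * bound) < end:
--             center = indexes.pop(0)
--             end = min(len(source), center + bound)
--         result.append(source[start:end])
--     return '\n'.join(result)
-- ===== SOURCE B (Python) =====
-- def extract_surrounding(source, indexes, bound=100):
--     # Pass 1: drain indexes into an interval table (start, end, center).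
--     intervals = []
--     while indexes:
--         c = indexes.pop(0)
--         intervals.append((max(0, c - bound), min(len(source), c + bound), c))
--     # Pass 2: merge the table into disjoint windows.
--     merged = []
--     for s, e, c in intervals:
--         if merged and c - 2 * bound < merged[-1][1]:
--             merged[-1] = (merged[-1][0], e)
--         else:
--             merged.append((s, e))
--     return '\n'.join(source[s:e] for s, e in merged)
-- ===== Notes on version B (the rewrite author's own statement) =====
-- stated objective: alternative
-- what changed: A's single interleaved outer/inner while scan is split into two separate passes: first drain indexes into an explicit (start,end,center) interval table, then merge that table into disjoint windows with a fold that extends or appends the last merged window, and finally join the slices.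
import Mathlib
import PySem

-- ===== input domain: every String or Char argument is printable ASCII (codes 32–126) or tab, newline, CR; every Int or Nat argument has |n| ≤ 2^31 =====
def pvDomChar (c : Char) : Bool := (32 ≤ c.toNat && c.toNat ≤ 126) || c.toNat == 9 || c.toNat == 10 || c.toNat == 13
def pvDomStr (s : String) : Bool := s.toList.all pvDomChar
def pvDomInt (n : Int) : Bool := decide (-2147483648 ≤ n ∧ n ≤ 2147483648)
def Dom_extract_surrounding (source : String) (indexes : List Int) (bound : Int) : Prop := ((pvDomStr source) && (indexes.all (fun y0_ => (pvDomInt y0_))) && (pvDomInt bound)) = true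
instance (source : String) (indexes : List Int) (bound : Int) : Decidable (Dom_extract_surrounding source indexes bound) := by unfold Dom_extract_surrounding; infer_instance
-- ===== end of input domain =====

-- B rebuilds A as two separate passes (interval table, then a merge pass) instead of A's
-- interleaved outer/inner while loops; equivalence is about the RETURN value (both Pythons
-- also drain the `indexes` list in place, the same observable mutation).

-- ===== PORT A =====
-- A's inner while: absorb following centers while `indexes[0] - 2*bound < end`,
-- updating `end`; returns the final `end` and the remaining indexes.
def pvInnerA (slen bound : Int) : List Int → Int → Int × List Int
  | [], e => (e, [])
  | c :: tl, e =>
    if c - 2 * bound < e then pvInnerA slen bound tl (min slen (c + bound))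
    else (e, c :: tl)

theorem pvInnerA_len_le (slen bound : Int) (l : List Int) (e : Int) :
    (pvInnerA slen bound l e).2.length ≤ l.length := by
  induction l generalizing e with
  | nil => simp [pvInnerA]
  | cons c tl ih =>
    simp only [pvInnerA]
    split
    · exact Nat.le_trans (ih _) (Nat.le_succ _)
    · exact Nat.le_refl _

-- A's outer while: pop a center, compute start/end, run the inner loop, emit the slice.
def pvOuterA (source : String) (bound : Int) : List Int → List String
  | [] => []
  | c :: tl =>
    let start := max 0 (c - bound)
    let e := min (PySem.Str.len source) (c + bound)
    let p := pvInnerA (PySem.Str.len source) bound tl e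
    PySem.Str.slice source (some start) (some p.1) :: pvOuterA source bound p.2
  termination_by l => l.length
  decreasing_by
    exact Nat.lt_succ_of_le (pvInnerA_len_le _ _ _ _)

def extract_surrounding (source : String) (indexes : List Int) (bound : Int) : String :=
  PySem.Str.join "\n" (pvOuterA source bound indexes)

-- ===== PORT B =====
-- B pass 1: drain indexes into a table of (start, end, center).
def pvIntervalsB (slen bound : Int) : List Int → List (Int × Int × Int)
  | [] => []
  | c :: tl => (max 0 (c - bound), min slen (c + bound), c) :: pvIntervalsB slen bound tl

-- B pass 2 step: extend the last merged window or open a new one.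
def pvMergeStepB (bound : Int) (merged : List (Int × Int)) (iv : Int × Int × Int) : List (Int × Int) :=
  match merged.getLast? with
  | some last =>
    if iv.2.2 - 2 * bound < last.2 then merged.dropLast ++ [(last.1, iv.2.1)]
    else merged ++ [(iv.1, iv.2.1)]
  | none => merged ++ [(iv.1, iv.2.1)]

def extract_surrounding_alt (source : String) (indexes : List Int) (bound : Int) : String :=
  let ivs := pvIntervalsB (PySem.Str.len source) bound indexes
  let merged := ivs.foldl (pvMergeStepB bound) []
  PySem.Str.join "\n" (merged.map (fun p => PySem.Str.slice source (some p.1) (some p.2)))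

-- ===== PRECONDITION & SPEC =====
def Spec_extract_surrounding (source : String) (indexes : List Int) (bound : Int) (out : String) : Prop := out = extract_surrounding_alt source indexes bound
instance (source : String) (indexes : List Int) (bound : Int) (out : String) : Decidable (Spec_extract_surrounding source indexes bound out) := by unfold Spec_extract_surrounding; infer_instance

-- ===== CLAIM (what is proved, stated in full; the proofs are below) =====
def Claim_equal_extract_surrounding : Prop := ∀ (source : String) (indexes : List Int) (bound : Int), Dom_extract_surrounding source indexes bound → Spec_extract_surrounding source indexes bound (extract_surrounding source indexes bound)

-- ===== LEMMAS AND PROOFS =====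

-- Merging the table of `tl` onto an open window (s, e): the recursive shape of B's fold.
def pvMergeFrom (slen bound : Int) (s e : Int) : List Int → List (Int × Int)
  | [] => [(s, e)]
  | c :: tl =>
    if c - 2 * bound < e then pvMergeFrom slen bound s (min slen (c + bound)) tl
    else (s, e) :: pvMergeFrom slen bound (max 0 (c - bound)) (min slen (c + bound)) tl

theorem pvMergeStepB_concat (bound : Int) (pre : List (Int × Int)) (s e : Int) (iv : Int × Int × Int) :
    pvMergeStepB bound (pre ++ [(s, e)]) iv =
      if iv.2.2 - 2 * bound < e then pre ++ [(s, iv.2.1)]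
      else pre ++ [(s, e)] ++ [(iv.1, iv.2.1)] := by
  simp [pvMergeStepB, List.getLast?_append]

theorem pvFoldl_mergeFrom (slen bound : Int) (tl : List Int) :
    ∀ (pre : List (Int × Int)) (s e : Int),
      (pvIntervalsB slen bound tl).foldl (pvMergeStepB bound) (pre ++ [(s, e)]) =
        pre ++ pvMergeFrom slen bound s e tl := by
  induction tl with
  | nil => intro pre s e; simp [pvIntervalsB, pvMergeFrom]
  | cons c tl ih =>
    intro pre s e
    simp only [pvIntervalsB, List.foldl_cons, pvMergeStepB_concat, pvMergeFrom]
    split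
    · exact ih pre s _
    · rw [ih (pre ++ [(s, e)])]
      simp

-- The open-window merge is exactly A's inner absorption loop followed by a fresh run.
def pvMergeRuns (slen bound : Int) : List Int → List (Int × Int)
  | [] => []
  | c :: tl => pvMergeFrom slen bound (max 0 (c - bound)) (min slen (c + bound)) tl

theorem pvMergeFrom_inner (slen bound : Int) (tl : List Int) :
    ∀ (s e : Int),
      pvMergeFrom slen bound s e tl =
        (s, (pvInnerA slen bound tl e).1) :: pvMergeRuns slen bound (pvInnerA slen bound tl e).2 := by
  induction tl with
  | nil => intro s e; simp [pvMergeFrom, pvInnerA, pvMergeRuns]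
  | cons c tl ih =>
    intro s e
    simp only [pvMergeFrom, pvInnerA]
    split
    · exact ih s _
    · simp [pvMergeRuns]

theorem pvOuterA_eq_mergeRuns (source : String) (bound : Int) (idx : List Int) :
    pvOuterA source bound idx =
      (pvMergeRuns (PySem.Str.len source) bound idx).map
        (fun p => PySem.Str.slice source (some p.1) (some p.2)) := by
  induction idx using pvOuterA.induct source bound with
  | case1 => simp [pvOuterA, pvMergeRuns]
  | case2 c tl start e ih =>
    simp only [pvOuterA, pvMergeRuns]
    rw [pvMergeFrom_inner]
    simp only [List.map_cons]
    exact congrArg _ ih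

-- ===== VERDICT (by name: the statement is the Claim_ definition above) =====
theorem extract_surrounding_spec : Claim_equal_extract_surrounding := by
  intro source indexes bound _
  unfold Spec_extract_surrounding extract_surrounding extract_surrounding_alt
  congr 1
  rw [pvOuterA_eq_mergeRuns]
  congr 1
  cases indexes with
  | nil => simp [pvIntervalsB, pvMergeRuns]
  | cons c tl =>
    simp only [pvIntervalsB, List.foldl_cons, pvMergeStepB, List.getLast?_nil,
      List.nil_append, pvMergeRuns]
    exact (pvFoldl_mergeFrom _ _ tl [] _ _).symm
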